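-- pv_equiv track=rewrite | github.com/Kruspe/aoc-2020 | 06/solution.py | get_answers_part1
-- ===== SOURCE A (Python) =====
-- def get_answers_part1(list):
--     answers = []
--     group_answers = set()
--     for i in list:
--         if i.isspace():
--             answers.append(group_answers)
--             group_answers = set()
--         else:
--             for answer in i.strip():
--                 group_answers.add(answer)
--     answers.append(group_answers)
--     return answers
-- ===== SOURCE B (Python) =====
-- def get_answers_part1(list):
--     # Alternative decomposition: repeatedly scan to the first whitespace-only
--     # separator line, emit the set of answer characters of the group before it,
--     # and continue on the remainder (instead of growing one set incrementally).
--     answers = []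
--     rest = list
--     while True:
--         i = 0
--         while i < len(rest) and not rest[i].isspace():
--             i += 1
--         answers.append({ch for line in rest[:i] for ch in line.strip()})
--         if i == len(rest):
--             return answers
--         rest = rest[i + 1:]
-- ===== Notes on version B (the rewrite author's own statement) =====
-- stated objective: alternative
-- what changed: Replaces A's single incremental loop (growing one set per line) with repeated scan-to-the-next-separator: each iteration finds the first whitespace-only line, builds the whole group's set at once from the slice before it via a set comprehension, and continues on the remainder.
import Mathlib
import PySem

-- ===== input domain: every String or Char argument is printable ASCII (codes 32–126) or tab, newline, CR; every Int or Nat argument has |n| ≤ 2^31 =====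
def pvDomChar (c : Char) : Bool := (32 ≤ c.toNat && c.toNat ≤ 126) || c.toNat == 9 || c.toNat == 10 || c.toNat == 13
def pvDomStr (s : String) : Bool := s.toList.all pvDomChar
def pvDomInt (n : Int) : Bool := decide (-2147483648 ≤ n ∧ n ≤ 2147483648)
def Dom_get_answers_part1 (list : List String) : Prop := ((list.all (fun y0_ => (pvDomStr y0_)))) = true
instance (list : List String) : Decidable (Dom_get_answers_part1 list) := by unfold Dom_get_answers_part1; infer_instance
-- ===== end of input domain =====

-- B replaces A's incremental one-pass set building with a scan-to-next-separator
-- decomposition (build each group's set at once from the slice before the separator);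
-- same results, no speed claim.

-- ===== PORT A =====
def get_answers_part1 (list : List String) : List (List String) :=
  let st := list.foldl
    (fun (st : List (List String) × PySem.Set String) i =>
      if PySem.Str.strIsspace i then
        (st.1 ++ [st.2], PySem.Set.empty)
      else
        (st.1, ((PySem.Str.strip i).toList.map (fun c => String.mk [c])).foldl PySem.Set.add st.2))
    ([], PySem.Set.empty)
  st.1 ++ [st.2]

-- ===== PORT B =====
-- the answer characters (as 1-char strings, Python iterates strings as strings) of a group's lines, in order
def pvGroupChars (lines : List String) : List String :=
  lines.flatMap (fun line => (PySem.Str.strip line).toList.map (fun c => String.mk [c]))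

-- the 'while True' loop of Source B: the inner index scan to the first whitespace-only line is
-- takeWhile (= rest[:i]) / dropWhile (= rest[i:]); emit the group's set, continue on rest[i+1:]
def pvAltGo (answers : List (List String)) (rest : List String) : List (List String) :=
  match h : rest.dropWhile (fun l => !PySem.Str.strIsspace l) with
  | [] => answers ++ [PySem.Set.ofList (pvGroupChars (rest.takeWhile (fun l => !PySem.Str.strIsspace l)))]
  | _ :: tl =>
      pvAltGo (answers ++ [PySem.Set.ofList (pvGroupChars (rest.takeWhile (fun l => !PySem.Str.strIsspace l)))]) tl
termination_by rest.length
decreasing_by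
  have h1 : (rest.dropWhile (fun l => !PySem.Str.strIsspace l)).length ≤ rest.length :=
    List.length_dropWhile_le _ _
  rw [h] at h1
  simp at h1
  omega

def get_answers_part1_alt (list : List String) : List (List String) :=
  pvAltGo [] list

-- ===== PRECONDITION & SPEC =====
def Spec_get_answers_part1 (list : List String) (out : List (List String)) : Prop := out = get_answers_part1_alt list
instance (list : List String) (out : List (List String)) : Decidable (Spec_get_answers_part1 list out) := by unfold Spec_get_answers_part1; infer_instance

-- ===== CLAIM (what is proved, stated in full; the proofs are below) =====
def Claim_equal_get_answers_part1 : Prop := ∀ (list : List String), Dom_get_answers_part1 list → Spec_get_answers_part1 list (get_answers_part1 list)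

-- ===== LEMMAS AND PROOFS =====

-- pvAltGo with the first group's set seeded with an already-accumulated set `cur`
def pvAGoFrom (answers : List (List String)) (cur : PySem.Set String) (rest : List String) : List (List String) :=
  match h : rest.dropWhile (fun l => !PySem.Str.strIsspace l) with
  | [] => answers ++ [PySem.Set.update cur (pvGroupChars (rest.takeWhile (fun l => !PySem.Str.strIsspace l)))]
  | _ :: tl =>
      pvAGoFrom (answers ++ [PySem.Set.update cur (pvGroupChars (rest.takeWhile (fun l => !PySem.Str.strIsspace l)))])
        PySem.Set.empty tl
termination_by rest.length
decreasing_by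
  have h1 : (rest.dropWhile (fun l => !PySem.Str.strIsspace l)).length ≤ rest.length :=
    List.length_dropWhile_le _ _
  rw [h] at h1
  simp at h1
  omega

lemma pvAGoFrom_empty (answers : List (List String)) (rest : List String) :
    pvAGoFrom answers PySem.Set.empty rest = pvAltGo answers rest := by
  rw [pvAGoFrom, pvAltGo]
  have hup : ∀ xs : List String, PySem.Set.update PySem.Set.empty xs = PySem.Set.ofList xs :=
    fun xs => rfl
  cases h : rest.dropWhile (fun l => !PySem.Str.strIsspace l) with
  | nil => simp only [h, hup]
  | cons x tl =>
      simp only [h, hup]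
      exact pvAGoFrom_empty _ tl
termination_by rest.length
decreasing_by
  have h1 : (rest.dropWhile (fun l => !PySem.Str.strIsspace l)).length ≤ rest.length :=
    List.length_dropWhile_le _ _
  rw [h] at h1
  simp at h1
  omega

lemma pvAGoFrom_cons_space (i : String) (l : List String) (answers : List (List String))
    (cur : PySem.Set String) (hi : PySem.Str.strIsspace i = true) :
    pvAGoFrom answers cur (i :: l) = pvAGoFrom (answers ++ [cur]) PySem.Set.empty l := by
  have hi' : PySem.Chars.strIsspace i.toList = true := by simpa using hi
  have hd : (i :: l).dropWhile (fun l => !PySem.Str.strIsspace l) = i :: l := by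
    simp [List.dropWhile_cons, hi']
  have ht : (i :: l).takeWhile (fun l => !PySem.Str.strIsspace l) = [] := by
    simp [List.takeWhile_cons, hi']
  conv_lhs => rw [pvAGoFrom]
  split
  · rename_i heq
    rw [hd] at heq
    cases heq
  · rename_i x tl heq
    rw [hd] at heq
    injection heq with h3 h4
    subst h4
    rw [ht]
    rfl

lemma pvAGoFrom_cons_nonspace (i : String) (l : List String) (answers : List (List String))
    (cur : PySem.Set String) (hi : PySem.Str.strIsspace i = false) :
    pvAGoFrom answers cur (i :: l) =
      pvAGoFrom answers
        (PySem.Set.update cur ((PySem.Str.strip i).toList.map (fun c => String.mk [c]))) l := by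
  have hi' : PySem.Chars.strIsspace i.toList = false := by simpa using hi
  have hd : (i :: l).dropWhile (fun l => !PySem.Str.strIsspace l)
      = l.dropWhile (fun l => !PySem.Str.strIsspace l) := by
    simp [List.dropWhile_cons, hi']
  have ht : (i :: l).takeWhile (fun l => !PySem.Str.strIsspace l)
      = i :: l.takeWhile (fun l => !PySem.Str.strIsspace l) := by
    simp [List.takeWhile_cons, hi']
  have hgc : ∀ t : List String, PySem.Set.update cur (pvGroupChars (i :: t))
      = PySem.Set.update
          (PySem.Set.update cur ((PySem.Str.strip i).toList.map (fun c => String.mk [c])))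
          (pvGroupChars t) := by
    intro t
    simp [pvGroupChars, PySem.Set.update, List.foldl_append]
  rw [pvAGoFrom, pvAGoFrom]
  split
  · rename_i heq
    rw [hd] at heq
    split
    · rw [ht, hgc]
    · rename_i x tl heq2
      rw [heq] at heq2
      cases heq2
  · rename_i x tl heq
    rw [hd] at heq
    split
    · rename_i heq2
      rw [heq] at heq2
      cases heq2
    · rename_i y tl2 heq2
      rw [heq] at heq2
      injection heq2 with e1 e2
      subst e2
      rw [ht, hgc]

lemma pvMain (l : List String) : ∀ (answers : List (List String)) (cur : PySem.Set String),
    (let st := l.foldl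
      (fun (st : List (List String) × PySem.Set String) i =>
        if PySem.Str.strIsspace i then
          (st.1 ++ [st.2], PySem.Set.empty)
        else
          (st.1, ((PySem.Str.strip i).toList.map (fun c => String.mk [c])).foldl PySem.Set.add st.2))
      (answers, cur)
     st.1 ++ [st.2]) = pvAGoFrom answers cur l := by
  induction l with
  | nil =>
      intro answers cur
      rw [pvAGoFrom]
      simp [pvGroupChars, PySem.Set.update]
  | cons i l ih =>
      intro answers cur
      cases hi : PySem.Str.strIsspace i with
      | true =>
          simp only [List.foldl_cons, hi, reduceIte]
          rw [ih, pvAGoFrom_cons_space i l answers cur hi]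
      | false =>
          simp only [List.foldl_cons, hi, Bool.false_eq_true, reduceIte]
          rw [ih, pvAGoFrom_cons_nonspace i l answers cur hi]
          rfl

-- ===== VERDICT (by name: the statement is the Claim_ definition above) =====
theorem get_answers_part1_spec : Claim_equal_get_answers_part1 := by
  intro list _
  unfold Spec_get_answers_part1 get_answers_part1 get_answers_part1_alt
  rw [pvMain, pvAGoFrom_empty]
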